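-- pv_equiv track=rewrite | github.com/maryamkhanzada/Hackathon-0 | watchers/linkedin_watcher.py | _classify_lead_type
-- ===== SOURCE A (Python) =====
-- def _classify_lead_type(matched_keywords: list[str]) -> str:
--     """Classify the type of sales lead."""
--     if any(kw in matched_keywords for kw in ("buy", "purchase")):
--         return "hot_lead"
--     if any(kw in matched_keywords for kw in ("quote", "pricing", "proposal")):
--         return "warm_lead"
--     if any(kw in matched_keywords for kw in ("interested", "demo", "trial")):
--         return "interested_prospect"
--     return "general_inquiry"
-- ===== SOURCE B (Python) =====
-- _LEAD_RANKS = {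
--     "buy": 0, "purchase": 0,
--     "quote": 1, "pricing": 1, "proposal": 1,
--     "interested": 2, "demo": 2, "trial": 2,
-- }
-- _LEAD_LABELS = ["hot_lead", "warm_lead", "interested_prospect", "general_inquiry"]
--
--
-- def _classify_lead_type(matched_keywords: list[str]) -> str:
--     """Classify the type of sales lead."""
--     best = 3
--     for kw in matched_keywords:
--         best = min(best, _LEAD_RANKS.get(kw, 3))
--     return _LEAD_LABELS[best]
-- ===== Notes on version B (the rewrite author's own statement) =====
-- stated objective: idiomatic
-- what changed: Replaces the three fixed-group membership scans with a single pass over matched_keywords that keeps a running minimum tier rank via a keyword->rank dict, then indexes a label table.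
import Mathlib
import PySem

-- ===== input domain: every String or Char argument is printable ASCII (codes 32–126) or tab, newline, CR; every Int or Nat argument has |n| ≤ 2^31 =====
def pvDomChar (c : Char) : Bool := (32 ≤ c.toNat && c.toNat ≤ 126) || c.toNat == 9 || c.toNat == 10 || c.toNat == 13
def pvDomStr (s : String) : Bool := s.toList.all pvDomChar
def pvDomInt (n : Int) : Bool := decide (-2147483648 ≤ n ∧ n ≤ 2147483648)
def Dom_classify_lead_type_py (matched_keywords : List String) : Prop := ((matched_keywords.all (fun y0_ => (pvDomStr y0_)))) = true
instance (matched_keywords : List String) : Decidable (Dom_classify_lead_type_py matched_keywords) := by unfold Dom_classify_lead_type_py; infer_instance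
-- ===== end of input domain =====

-- B replaces A's three fixed-group membership scans by one pass over matched_keywords
-- keeping a running minimum tier rank (keyword → rank dict, label table); idiomatic, same behaviour.

-- ===== PORT A =====
def classify_lead_type_py (matched_keywords : List String) : String :=
  if ["buy", "purchase"].any (fun kw => matched_keywords.contains kw) then
    "hot_lead"
  else if ["quote", "pricing", "proposal"].any (fun kw => matched_keywords.contains kw) then
    "warm_lead"
  else if ["interested", "demo", "trial"].any (fun kw => matched_keywords.contains kw) then
    "interested_prospect"
  else
    "general_inquiry"

-- ===== PORT B =====
def pvLeadRanks : PySem.Dict String Int :=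
  PySem.Dict.ofList
    [("buy", 0), ("purchase", 0),
     ("quote", 1), ("pricing", 1), ("proposal", 1),
     ("interested", 2), ("demo", 2), ("trial", 2)]

def pvLeadLabels : List String := ["hot_lead", "warm_lead", "interested_prospect", "general_inquiry"]

def classify_lead_type_py_alt (matched_keywords : List String) : String :=
  let best := matched_keywords.foldl (fun b kw => min b (PySem.Dict.getD pvLeadRanks kw 3)) 3
  -- best always lies in [0, 3], so the index is in range and the default is unreachable
  (PySem.List.pyGet? pvLeadLabels best).getD ""

-- ===== PRECONDITION & SPEC =====
def Spec_classify_lead_type_py (matched_keywords : List String) (out : String) : Prop := out = classify_lead_type_py_alt matched_keywords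
instance (matched_keywords : List String) (out : String) : Decidable (Spec_classify_lead_type_py matched_keywords out) := by unfold Spec_classify_lead_type_py; infer_instance

-- ===== CLAIM (what is proved, stated in full; the proofs are below) =====
def Claim_equal_classify_lead_type_py : Prop := ∀ (matched_keywords : List String), Dom_classify_lead_type_py matched_keywords → Spec_classify_lead_type_py matched_keywords (classify_lead_type_py matched_keywords)

-- ===== LEMMAS AND PROOFS =====

-- the rank a keyword gets in B
def pvRank (x : String) : Int := PySem.Dict.getD pvLeadRanks x 3

set_option maxHeartbeats 2000000 in
theorem pvRank_eq (x : String) :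
    pvRank x =
      (if x = "buy" then 0 else if x = "purchase" then 0 else
       if x = "quote" then 1 else if x = "pricing" then 1 else if x = "proposal" then 1 else
       if x = "interested" then 2 else if x = "demo" then 2 else if x = "trial" then 2 else 3) := by
  have h : pvLeadRanks = PySem.Dict.mk
      [("buy", 0), ("purchase", 0),
       ("quote", 1), ("pricing", 1), ("proposal", 1),
       ("interested", 2), ("demo", 2), ("trial", 2)] := by decide
  unfold pvRank
  rw [PySem.Dict.getD_eq_get?_getD, h]
  simp only [PySem.Dict.get?_mk_cons, beq_iff_eq]
  split_ifs <;> first | rfl | simp_all [eq_comm]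

theorem pvRank_nonneg (x : String) : 0 ≤ pvRank x := by
  rw [pvRank_eq]; split_ifs <;> norm_num

theorem pvRank_le_three (x : String) : pvRank x ≤ 3 := by
  rw [pvRank_eq]; split_ifs <;> norm_num

-- B's fold, written once
def pvBest (b : Int) (l : List String) : Int :=
  l.foldl (fun b kw => min b (PySem.Dict.getD pvLeadRanks kw 3)) b

theorem pvBest_le_init (l : List String) : ∀ b : Int, pvBest b l ≤ b := by
  induction l with
  | nil => intro b; simp [pvBest]
  | cons x xs ih =>
      intro b
      calc pvBest b (x :: xs) = pvBest (min b (pvRank x)) xs := rfl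
        _ ≤ min b (pvRank x) := ih _
        _ ≤ b := min_le_left _ _

theorem pvBest_le_mem (l : List String) (x : String) : ∀ b : Int, x ∈ l → pvBest b l ≤ pvRank x := by
  induction l with
  | nil => intro b hx; cases hx
  | cons y ys ih =>
      intro b hx
      rcases List.mem_cons.mp hx with h | h
      · subst h
        calc pvBest b (x :: ys) = pvBest (min b (pvRank x)) ys := rfl
          _ ≤ min b (pvRank x) := pvBest_le_init _ _
          _ ≤ pvRank x := min_le_right _ _
      · exact ih _ h

theorem le_pvBest (l : List String) (k : Int) (hl : ∀ x ∈ l, k ≤ pvRank x) :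
    ∀ b : Int, k ≤ b → k ≤ pvBest b l := by
  induction l with
  | nil => intro b hb; simpa [pvBest] using hb
  | cons y ys ih =>
      intro b hb
      have hmin : k ≤ min b (pvRank y) := le_min hb (hl y List.mem_cons_self)
      exact ih (fun x hx => hl x (List.mem_cons_of_mem _ hx)) _ hmin

theorem pvBest_eq_of (l : List String) (k : Int) (x : String) (hx : x ∈ l)
    (hr : pvRank x = k) (hl : ∀ y ∈ l, k ≤ pvRank y) : pvBest 3 l = k :=
  le_antisymm (hr ▸ pvBest_le_mem l x 3 hx)
    (le_pvBest l k hl 3 (hr ▸ pvRank_le_three x))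

-- ===== VERDICT (by name: the statement is the Claim_ definition above) =====
theorem classify_lead_type_py_spec : Claim_equal_classify_lead_type_py := by
  intro l _
  unfold Spec_classify_lead_type_py classify_lead_type_py classify_lead_type_py_alt
  show _ = (PySem.List.pyGet? pvLeadLabels (pvBest 3 l)).getD ""
  simp only [List.any_cons, List.any_nil, Bool.or_false, Bool.or_eq_true,
    List.contains_iff_mem]
  by_cases h0 : "buy" ∈ l ∨ "purchase" ∈ l
  · rw [if_pos h0]
    have hb : pvBest 3 l = 0 := by
      rcases h0 with h | h
      · exact pvBest_eq_of l 0 _ h (by decide) (fun y _ => pvRank_nonneg y)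
      · exact pvBest_eq_of l 0 _ h (by decide) (fun y _ => pvRank_nonneg y)
    rw [hb]; decide
  · rw [if_neg h0]
    push Not at h0
    have h0' : ∀ y ∈ l, y ≠ "buy" ∧ y ≠ "purchase" := by
      rintro y hy
      exact ⟨fun e => h0.1 (e ▸ hy), fun e => h0.2 (e ▸ hy)⟩
    by_cases h1 : "quote" ∈ l ∨ "pricing" ∈ l ∨ "proposal" ∈ l
    · rw [if_pos h1]
      have hge : ∀ y ∈ l, (1 : Int) ≤ pvRank y := by
        intro y hy
        have ha := h0' y hy
        rw [pvRank_eq, if_neg ha.1, if_neg ha.2]; split_ifs <;> norm_num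
      have hb : pvBest 3 l = 1 := by
        rcases h1 with h | h | h
        · exact pvBest_eq_of l 1 _ h (by decide) hge
        · exact pvBest_eq_of l 1 _ h (by decide) hge
        · exact pvBest_eq_of l 1 _ h (by decide) hge
      rw [hb]; decide
    · rw [if_neg h1]
      push Not at h1
      have h1' : ∀ y ∈ l, y ≠ "quote" ∧ y ≠ "pricing" ∧ y ≠ "proposal" := by
        rintro y hy
        exact ⟨fun e => h1.1 (e ▸ hy), fun e => h1.2.1 (e ▸ hy), fun e => h1.2.2 (e ▸ hy)⟩
      by_cases h2 : "interested" ∈ l ∨ "demo" ∈ l ∨ "trial" ∈ l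
      · rw [if_pos h2]
        have hge : ∀ y ∈ l, (2 : Int) ≤ pvRank y := by
          intro y hy
          have ha := h0' y hy; have hbq := h1' y hy
          rw [pvRank_eq, if_neg ha.1, if_neg ha.2, if_neg hbq.1, if_neg hbq.2.1,
            if_neg hbq.2.2]
          split_ifs <;> norm_num
        have hb : pvBest 3 l = 2 := by
          rcases h2 with h | h | h
          · exact pvBest_eq_of l 2 _ h (by decide) hge
          · exact pvBest_eq_of l 2 _ h (by decide) hge
          · exact pvBest_eq_of l 2 _ h (by decide) hge
        rw [hb]; decide
      · rw [if_neg h2]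
        push Not at h2
        have h2' : ∀ y ∈ l, y ≠ "interested" ∧ y ≠ "demo" ∧ y ≠ "trial" := by
          rintro y hy
          exact ⟨fun e => h2.1 (e ▸ hy), fun e => h2.2.1 (e ▸ hy), fun e => h2.2.2 (e ▸ hy)⟩
        have hge : ∀ y ∈ l, (3 : Int) ≤ pvRank y := by
          intro y hy
          have ha := h0' y hy; have hbq := h1' y hy; have hc := h2' y hy
          rw [pvRank_eq, if_neg ha.1, if_neg ha.2, if_neg hbq.1, if_neg hbq.2.1,
            if_neg hbq.2.2, if_neg hc.1, if_neg hc.2.1, if_neg hc.2.2]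
        have hb : pvBest 3 l = 3 :=
          le_antisymm (pvBest_le_init l 3) (le_pvBest l 3 hge 3 le_rfl)
        rw [hb]; decide
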